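-- pv_equiv track=rewrite | github.com/DragunWF/Competitive-Programming | CodeWars/python/7_kyu/min_max_min_bounded_nums.py | min_min_max
-- ===== SOURCE A (Python) =====
-- def min_min_max(arr: list) -> list:
--     min_num = min(arr)
--     max_num = max(arr)
--     minimum_absent = None
--     for num in range(min_num + 1, max_num):
--         if not num in arr:
--             minimum_absent = num
--             break
--     return [min_num, minimum_absent, max_num]
-- ===== SOURCE B (Python) =====
-- def min_min_max(arr: list) -> list:
--     min_num = min(arr)
--     max_num = max(arr)
--     s = sorted(arr)
--     minimum_absent = None
--     for a, b in zip(s, s[1:]):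
--         if b - a > 1:
--             minimum_absent = a + 1
--             break
--     return [min_num, minimum_absent, max_num]
-- ===== Notes on version B (the rewrite author's own statement) =====
-- stated objective: alternative
-- what changed: Replaces the repeated membership scan over range(min+1,max) with a sort followed by a single adjacent-pair pass that finds the first gap; it trades A's worst-case O((max-min)*n) scanning for a guaranteed O(n log n) sort, though on typical inputs where A's scan exits early it is not measurably faster.
import Mathlib
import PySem

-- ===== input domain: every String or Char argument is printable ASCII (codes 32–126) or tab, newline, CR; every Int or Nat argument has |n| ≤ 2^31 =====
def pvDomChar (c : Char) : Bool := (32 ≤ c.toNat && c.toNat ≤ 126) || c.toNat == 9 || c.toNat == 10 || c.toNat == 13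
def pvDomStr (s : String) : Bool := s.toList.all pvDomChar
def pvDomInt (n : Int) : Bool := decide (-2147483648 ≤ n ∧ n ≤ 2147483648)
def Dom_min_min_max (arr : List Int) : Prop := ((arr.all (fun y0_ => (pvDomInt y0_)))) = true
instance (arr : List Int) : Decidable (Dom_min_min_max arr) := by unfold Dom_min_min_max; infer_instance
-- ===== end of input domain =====

-- B replaces A's repeated membership scan over range(min+1, max) with sort + first-gap scan (a different algorithm; return-value equivalence proved on nonempty lists).


-- ===== PORT A =====
-- the 'for num in range(min_num+1, max_num): if not num in arr: …; break' loop;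
-- Python's range is a lazy iterator and the loop breaks, so the port recurses on the
-- current counter instead of materializing the (possibly huge) range list
def minMaxLoopA (arr : List Int) (n M : Int) : Option Int :=
  if n < M then
    if !(arr.contains n) then some n else minMaxLoopA arr (n + 1) M
  else none
termination_by (M - n).toNat
decreasing_by omega

def min_min_max (arr : List Int) : List (Option Int) :=
  match PySem.List.min? arr (fun x => x), PySem.List.max? arr (fun x => x) with
  | some m, some M => [some m, minMaxLoopA arr (m + 1) M, some M]
  | _, _ => []  -- Python's min()/max() raise ValueError on the empty list; excluded by Pre_

-- ===== PORT B =====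
-- the 'for a, b in zip(s, s[1:]): if b - a > 1: …; break' loop over adjacent pairs
def gapFirst : List Int → Option Int
  | a :: b :: t => if b - a > 1 then some (a + 1) else gapFirst (b :: t)
  | _ => none

def min_min_max_alt (arr : List Int) : List (Option Int) :=
  match PySem.List.min? arr (fun x => x) with
  | none => []  -- same ValueError corner, excluded by Pre_
  | some m =>
    match PySem.List.max? arr (fun x => x) with
    | none => []
    | some M => [some m, gapFirst (PySem.List.sorted arr (fun x => x)), some M]

-- ===== PRECONDITION & SPEC =====
-- A raises ValueError on the empty list (min of empty sequence); excluded.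
def Pre_min_min_max (arr : List Int) : Prop := arr ≠ []
instance (arr : List Int) : Decidable (Pre_min_min_max arr) := by unfold Pre_min_min_max; infer_instance
def pvWitness_min_min_max : List Int := [3, 1, 5]

def Spec_min_min_max (arr : List Int) (out : List (Option Int)) : Prop := out = min_min_max_alt arr
instance (arr : List Int) (out : List (Option Int)) : Decidable (Spec_min_min_max arr out) := by unfold Spec_min_min_max; infer_instance

-- ===== CLAIM (what is proved, stated in full; the proofs are below) =====
def Claim_equal_min_min_max : Prop := ∀ (arr : List Int), Dom_min_min_max arr → Pre_min_min_max arr → Spec_min_min_max arr (min_min_max arr)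

-- ===== LEMMAS AND PROOFS =====

-- A's loop is find? over the range list
lemma minMaxLoopA_eq_find? (arr : List Int) (n M : Int) :
    minMaxLoopA arr n M = (PySem.List.pyRange n M 1).find? (fun k => !(arr.contains k)) := by
  induction n using minMaxLoopA.induct (arr := arr) (M := M) with
  | case1 n h hc =>
    rw [minMaxLoopA, if_pos h, PySem.List.pyRange_one_cons h, List.find?]
    have hn : n ∉ arr := by simpa using hc
    simp [hn]
  | case2 n h hc ih =>
    rw [minMaxLoopA, if_pos h, PySem.List.pyRange_one_cons h, List.find?]
    have hn : n ∈ arr := by simpa using hc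
    simp [hn, ih]
  | case3 n h =>
    rw [minMaxLoopA, if_neg h, PySem.List.pyRange_one_eq_nil (by omega)]
    rfl

lemma find?_congr_mem {α : Type} (l : List α) (p q : α → Bool)
    (h : ∀ x ∈ l, p x = q x) : l.find? p = l.find? q := by
  induction l with
  | nil => rfl
  | cons x xs ih =>
    simp only [List.find?]
    rw [h x (by simp)]
    cases q x
    · exact ih (fun y hy => h y (by simp [hy]))
    · rfl

lemma head_le_getLastD (x : Int) (l : List Int)
    (h : (x :: l).Pairwise (· ≤ ·)) : ∀ y ∈ x :: l, y ≤ l.getLastD x := by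
  induction l generalizing x with
  | nil => intro y hy; simp at hy; simp [hy]
  | cons b t ih =>
    intro y hy
    have hxb : x ≤ b := (List.pairwise_cons.1 h).1 b (by simp)
    have htail := (List.pairwise_cons.1 h).2
    rw [List.getLastD_cons]
    rcases List.mem_cons.1 hy with rfl | hy'
    · exact le_trans hxb (ih b htail b (by simp))
    · exact ih b htail y hy'

-- the key lemma: on a sorted list, the first adjacent gap is the first missing
-- number of range(head+1, last)
lemma gapFirst_eq_find? (t : List Int) (a : Int)
    (hs : (a :: t).Pairwise (· ≤ ·)) :
    gapFirst (a :: t) =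
      (PySem.List.pyRange (a + 1) (t.getLastD a) 1).find?
        (fun n => !((a :: t).contains n)) := by
  induction t generalizing a with
  | nil =>
    rw [List.getLastD_nil, PySem.List.pyRange_one_eq_nil (by omega)]
    rfl
  | cons b t' ih =>
    have hab : a ≤ b := (List.pairwise_cons.1 hs).1 b (by simp)
    have htail : (b :: t').Pairwise (· ≤ ·) := (List.pairwise_cons.1 hs).2
    have hbt' : ∀ y ∈ t', b ≤ y := (List.pairwise_cons.1 htail).1
    have hbM : b ≤ t'.getLastD b := head_le_getLastD b t' htail b (by simp)
    rw [List.getLastD_cons]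
    by_cases hgap : b - a > 1
    · -- first gap right here: a+1 < b ≤ last, so a+1 heads the range and is absent
      rw [PySem.List.pyRange_one_cons (a := a + 1) (b := t'.getLastD b) (by omega)]
      rw [List.find?_cons_of_pos (p := fun n => !((a :: b :: t').contains n))
        (by simp; exact ⟨by omega, fun h => absurd (hbt' _ h) (by omega)⟩)]
      simp only [gapFirst]
      rw [if_pos hgap]
    · -- no gap: b = a or b = a+1; step to the tail
      have hstep : gapFirst (a :: b :: t') = gapFirst (b :: t') := by
        simp only [gapFirst]
        rw [if_neg (by omega)]
      rw [hstep, ih b htail]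
      have hb : b = a ∨ b = a + 1 := by omega
      rcases hb with rfl | rfl
      · -- duplicate head: same range, same membership
        refine find?_congr_mem _ _ _ (fun x _ => ?_)
        simp only [List.contains_eq_mem, List.mem_cons]
        by_cases hx : x = b ∨ x ∈ t'
        · simp [hx]
        · simp [hx]; tauto
      · -- b = a+1: range's head a+1 is present, the rest agrees with the tail's range
        by_cases hM : a + 1 < t'.getLastD (a + 1)
        · rw [PySem.List.pyRange_one_cons (a := a + 1) (b := t'.getLastD (a + 1)) hM]
          rw [List.find?_cons_of_neg (p := fun n => !((a :: (a + 1) :: t').contains n)) (by simp)]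
          refine (find?_congr_mem _ _ _ (fun x hx => ?_)).symm
          have hxmem := (PySem.List.mem_pyRange_one).1 hx
          have hxa : x ≠ a := by omega
          simp [List.contains_eq_mem, hxa]
        · rw [PySem.List.pyRange_one_eq_nil (by omega),
              PySem.List.pyRange_one_eq_nil (by omega)]
          simp [List.find?]

-- min? / max? return some on a nonempty list
lemma min?_isSome_of_ne_nil (arr : List Int) (h : arr ≠ []) :
    ∃ m, PySem.List.min? arr (fun x => x) = some m := by
  cases hx : PySem.List.min? arr (fun x => x) with
  | none => exact absurd ((PySem.List.min?_eq_none_iff arr _).1 hx) h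
  | some m => exact ⟨m, rfl⟩

lemma max?_isSome_of_ne_nil (arr : List Int) (h : arr ≠ []) :
    ∃ m, PySem.List.max? arr (fun x => x) = some m := by
  cases hx : PySem.List.max? arr (fun x => x) with
  | none => exact absurd ((PySem.List.max?_eq_none_iff arr _).1 hx) h
  | some m => exact ⟨m, rfl⟩

-- ===== VERDICT (by name: the statement is the Claim_ definition above) =====
theorem min_min_max_spec : Claim_equal_min_min_max := by
  intro arr _ hpre
  obtain ⟨m, hm⟩ := min?_isSome_of_ne_nil arr hpre
  obtain ⟨M, hM⟩ := max?_isSome_of_ne_nil arr hpre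
  unfold Spec_min_min_max min_min_max min_min_max_alt
  rw [hm, hM]
  dsimp only
  -- facts about m and M
  have hmMem : m ∈ arr := PySem.List.min?_mem hm
  have hmMin : ∀ y ∈ arr, m ≤ y := PySem.List.min?_isMin hm
  have hMMem : M ∈ arr := PySem.List.max?_mem hM
  have hMMax : ∀ y ∈ arr, y ≤ M := PySem.List.max?_isMax hM
  -- the sorted list
  set s := PySem.List.sorted arr (fun x => x) with hsdef
  have hperm : s.Perm arr := PySem.List.sorted_perm arr (fun x => x) false
  have hpw : s.Pairwise (· ≤ ·) := PySem.List.sorted_pairwise arr (fun x => x)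
  have hmem : ∀ x, x ∈ s ↔ x ∈ arr := fun x => hperm.mem_iff
  obtain ⟨h, t, hst⟩ : ∃ h t, s = h :: t := by
    cases hs : s with
    | nil => exact absurd ((hmem m).2 hmMem) (by simp [hs])
    | cons h t => exact ⟨h, t, rfl⟩
  rw [hst] at hpw hmem
  -- head of s is m
  have hhm : h = m := by
    have h1 : m ≤ h := hmMin h ((hmem h).1 (by simp))
    have h2 : h ≤ m := by
      rcases List.mem_cons.1 ((hmem m).2 hmMem) with rfl | hmt
      · rfl
      · exact (List.pairwise_cons.1 hpw).1 m hmt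
    omega
  -- last of s is M
  have hlM : t.getLastD h = M := by
    have hLmem : t.getLastD h ∈ h :: t := by
      cases t with
      | nil => simp
      | cons b t' =>
        rw [List.getLastD_cons]
        have : (b :: t').getLastD b ∈ b :: t' := by
          rw [show (b :: t').getLastD b = (b :: t').getLast (by simp) from
            (List.getLast_eq_getLastD (by simp)).symm]
          exact List.getLast_mem _
        simp only [List.getLastD_cons] at this
        exact List.mem_cons_of_mem h this
    have h1 : t.getLastD h ≤ M := hMMax _ ((hmem _).1 hLmem)
    have h2 : M ≤ t.getLastD h :=
      head_le_getLastD h t hpw M ((hmem M).2 hMMem)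
    omega
  -- reduce both middles to the same find?
  rw [hst, minMaxLoopA_eq_find? arr (m + 1) M, gapFirst_eq_find? t h hpw, hlM, hhm]
  subst hhm
  congr 2
  exact find?_congr_mem _ _ _ (fun x _ => by
    simp only [List.contains_eq_mem]
    rw [decide_eq_decide.2 (hmem x)])
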